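-- pv_equiv track=rewrite | github.com/alibaba/easydist | metadist/metashard/combination.py | shape_aligned_otherdim
-- ===== SOURCE A (Python) =====
-- def shape_aligned_otherdim(shape_1, shape_2, dim_idx):
--     """return True when shape_1 and shape_2 only different on dimension(dim_idx)"""
--     if len(shape_1) != len(shape_2):
--         return False
--
--     diff_dim = []
--     for idx in range(len(shape_1)):
--         if shape_1[idx] != shape_2[idx]:
--             diff_dim.append(idx)
--
--     if diff_dim == [dim_idx]:
--         return True
--     return False
-- ===== SOURCE B (Python) =====
-- def shape_aligned_otherdim(shape_1, shape_2, dim_idx):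
--     """return True when shape_1 and shape_2 only different on dimension(dim_idx)"""
--     if len(shape_1) != len(shape_2):
--         return False
--     if not (0 <= dim_idx < len(shape_1)):
--         return False
--     return (shape_1[:dim_idx] == shape_2[:dim_idx]
--             and shape_1[dim_idx + 1:] == shape_2[dim_idx + 1:]
--             and shape_1[dim_idx] != shape_2[dim_idx])
-- ===== Notes on version B (the rewrite author's own statement) =====
-- stated objective: simpler
-- what changed: Instead of scanning all indices and collecting every differing index into a list compared against [dim_idx], B guards the index range and compares the prefix before dim_idx and the suffix after it as slices, requiring the dim_idx elements to differ.
import Mathlib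
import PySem

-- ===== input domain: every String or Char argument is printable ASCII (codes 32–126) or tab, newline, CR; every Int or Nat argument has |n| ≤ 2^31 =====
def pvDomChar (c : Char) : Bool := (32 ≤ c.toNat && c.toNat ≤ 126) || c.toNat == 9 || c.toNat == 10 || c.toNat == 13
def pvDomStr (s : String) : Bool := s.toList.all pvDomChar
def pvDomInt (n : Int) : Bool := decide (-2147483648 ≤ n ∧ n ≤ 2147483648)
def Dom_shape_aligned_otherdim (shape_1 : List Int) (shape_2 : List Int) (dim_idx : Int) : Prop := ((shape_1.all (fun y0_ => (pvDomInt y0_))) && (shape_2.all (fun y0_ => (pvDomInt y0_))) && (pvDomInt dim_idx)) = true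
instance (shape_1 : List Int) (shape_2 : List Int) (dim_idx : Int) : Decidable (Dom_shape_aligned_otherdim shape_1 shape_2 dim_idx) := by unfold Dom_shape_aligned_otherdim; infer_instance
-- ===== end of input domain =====

-- B replaces A's scan-and-collect of all differing indices (compared against [dim_idx])
-- by a range guard plus a prefix/suffix slice comparison around dim_idx; same cost, simpler.

-- ===== PORT A =====
def shape_aligned_otherdim (shape_1 : List Int) (shape_2 : List Int) (dim_idx : Int) : Bool :=
  if shape_1.length ≠ shape_2.length then false
  else
    -- for idx in range(len(shape_1)): if shape_1[idx] != shape_2[idx]: diff_dim.append(idx)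
    -- (idx is always in range here, so shape_1[idx] is getD idx 0)
    let diff_dim : List Int := (List.range shape_1.length).foldl
      (fun acc idx => if shape_1.getD idx 0 ≠ shape_2.getD idx 0 then acc ++ [(idx : Int)] else acc) []
    if diff_dim = [dim_idx] then true else false

-- ===== PORT B =====
def shape_aligned_otherdim_alt (shape_1 : List Int) (shape_2 : List Int) (dim_idx : Int) : Bool :=
  if shape_1.length ≠ shape_2.length then false
  else if ¬ (0 ≤ dim_idx ∧ dim_idx < shape_1.length) then false
  else
    (PySem.List.slice shape_1 none (some dim_idx) = PySem.List.slice shape_2 none (some dim_idx)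
      ∧ PySem.List.slice shape_1 (some (dim_idx + 1)) none = PySem.List.slice shape_2 (some (dim_idx + 1)) none
      ∧ shape_1.getD dim_idx.toNat 0 ≠ shape_2.getD dim_idx.toNat 0 : Bool)

-- ===== PRECONDITION & SPEC =====
def Spec_shape_aligned_otherdim (shape_1 : List Int) (shape_2 : List Int) (dim_idx : Int) (out : Bool) : Prop := out = shape_aligned_otherdim_alt shape_1 shape_2 dim_idx
instance (shape_1 : List Int) (shape_2 : List Int) (dim_idx : Int) (out : Bool) : Decidable (Spec_shape_aligned_otherdim shape_1 shape_2 dim_idx out) := by unfold Spec_shape_aligned_otherdim; infer_instance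

-- ===== CLAIM (what is proved, stated in full; the proofs are below) =====
def Claim_equal_shape_aligned_otherdim : Prop := ∀ (shape_1 : List Int) (shape_2 : List Int) (dim_idx : Int), Dom_shape_aligned_otherdim shape_1 shape_2 dim_idx → Spec_shape_aligned_otherdim shape_1 shape_2 dim_idx (shape_aligned_otherdim shape_1 shape_2 dim_idx)

-- ===== LEMMAS AND PROOFS =====

-- filter over a range yields exactly [k] iff k is the unique index below n satisfying p
lemma pv_filter_range_singleton (p : ℕ → Bool) (n k : ℕ) :
    (List.range n).filter p = [k] ↔
      (k < n ∧ p k = true ∧ ∀ i, i < n → i ≠ k → p i = false) := by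
  induction n with
  | zero => simp
  | succ n ih =>
    rw [List.range_succ, List.filter_append]
    by_cases h : p n = true
    · simp only [List.filter_singleton, h]
      constructor
      · intro he
        rcases List.append_eq_cons_iff.mp he with ⟨h1, h2⟩ | ⟨as, h1, h2⟩
        · have hk : n = k := by simpa using h2
          have hnil : ∀ i, i < n → p i = false := by
            intro i hi
            simpa using List.filter_eq_nil_iff.mp h1 i (List.mem_range.mpr hi)
          refine ⟨by omega, hk ▸ h, fun i hi hne => ?_⟩
          rcases Nat.lt_succ_iff_lt_or_eq.mp hi with hi' | hi'
          · exact hnil i hi'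
          · exact absurd (hi'.trans hk) hne
        · exfalso
          rcases List.append_eq_nil_iff.mp h2.symm with ⟨_, habs⟩
          exact List.cons_ne_nil _ _ habs
      · rintro ⟨hk, hpk, huniq⟩
        have hkn : k = n := by
          by_contra hne
          have := huniq n (Nat.lt_succ_self n) (fun he => hne he.symm)
          rw [h] at this; exact Bool.false_ne_true this.symm
        have hnil : (List.range n).filter p = [] := by
          apply List.filter_eq_nil_iff.mpr
          intro i hi
          have hi' := List.mem_range.mp hi
          simp [huniq i (by omega) (by omega)]
        simp [hnil, hkn]
    · have h' : p n = false := by simpa using h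
      simp only [List.filter_singleton, h']
      simp only [cond_false, List.append_nil]
      rw [ih]
      constructor
      · rintro ⟨hk, hpk, huniq⟩
        refine ⟨Nat.lt_succ_of_lt hk, hpk, fun i hi hne => ?_⟩
        rcases Nat.lt_succ_iff_lt_or_eq.mp hi with hi' | hi'
        · exact huniq i hi' hne
        · exact hi' ▸ h'
      · rintro ⟨hk, hpk, huniq⟩
        have hkn : k ≠ n := by
          intro he; rw [he, h'] at hpk; exact Bool.false_ne_true hpk
        exact ⟨by omega, hpk, fun i hi hne => huniq i (Nat.lt_succ_of_lt hi) hne⟩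

-- A = true iff lengths match and there is a unique differing index whose Int cast is dim_idx
lemma pv_A_true_iff (a b : List Int) (d : Int) :
    shape_aligned_otherdim a b d = true ↔
      a.length = b.length ∧ ∃ k : ℕ, (k : Int) = d ∧ k < a.length ∧
        a.getD k 0 ≠ b.getD k 0 ∧
        ∀ i, i < a.length → i ≠ k → a.getD i 0 = b.getD i 0 := by
  unfold shape_aligned_otherdim
  by_cases hlen : a.length = b.length
  · rw [if_neg (not_not_intro hlen)]
    rw [PySem.List.foldl_append_ite (p := fun idx => a.getD idx 0 ≠ b.getD idx 0)
      (f := fun idx => ((idx : ℕ) : Int))]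
    simp only [List.nil_append]
    by_cases hm : ((List.range a.length).filter
        (fun idx => decide (a.getD idx 0 ≠ b.getD idx 0))).map (fun i => ((i : ℕ) : Int)) = [d]
    · rw [if_pos hm]
      simp only [true_iff]
      refine ⟨hlen, ?_⟩
      rcases List.map_eq_singleton_iff.mp hm with ⟨k, hfk, hkd⟩
      rw [pv_filter_range_singleton] at hfk
      exact ⟨k, hkd, hfk.1, by simpa using hfk.2.1, fun i hi hne => by
        simpa using hfk.2.2 i hi hne⟩
    · rw [if_neg hm]
      simp only [Bool.false_eq_true, false_iff]
      rintro ⟨-, k, hkd, hk, hne, huniq⟩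
      apply hm
      have hfk : (List.range a.length).filter
          (fun idx => decide (a.getD idx 0 ≠ b.getD idx 0)) = [k] := by
        rw [pv_filter_range_singleton]
        exact ⟨hk, by simpa using hne, fun i hi hnei => by simpa using huniq i hi hnei⟩
      rw [hfk]; simp [hkd]
  · rw [if_pos hlen]
    simp only [Bool.false_eq_true, false_iff]
    rintro ⟨h, -⟩; exact hlen h

-- take-prefix equality as a pointwise condition (via getElem?)
lemma pv_take_eq_iff (a b : List Int) (m : ℕ) :
    a.take m = b.take m ↔ ∀ i, i < m → a[i]? = b[i]? := by
  constructor
  · intro h i hi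
    have := congrArg (fun l => l[i]?) h
    simpa [hi] using this
  · intro h
    apply List.ext_getElem?
    intro i
    by_cases hi : i < m
    · simp [hi, h i hi]
    · simp [hi]

-- drop-suffix equality as a pointwise condition
lemma pv_drop_eq_iff (a b : List Int) (m : ℕ) :
    a.drop m = b.drop m ↔ ∀ i, m ≤ i → a[i]? = b[i]? := by
  constructor
  · intro h i hi
    have := congrArg (fun l => l[i - m]?) h
    simpa [List.getElem?_drop, Nat.add_sub_cancel' hi] using this
  · intro h
    apply List.ext_getElem?
    intro i
    simp only [List.getElem?_drop]
    exact h (m + i) (Nat.le_add_right m i)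

lemma pv_getD_eq_iff (a b : List Int) (i : ℕ) (hia : i < a.length) (hib : i < b.length) :
    (a.getD i 0 = b.getD i 0) ↔ a[i]? = b[i]? := by
  simp [List.getD_eq_getElem?_getD, hia, hib]

-- ===== VERDICT (by name: the statement is the Claim_ definition above) =====
theorem shape_aligned_otherdim_spec : Claim_equal_shape_aligned_otherdim := by
  intro a b d _
  unfold Spec_shape_aligned_otherdim
  by_cases hlen : a.length = b.length
  · by_cases hd : 0 ≤ d ∧ d < a.length
    · -- in-range dimension index
      obtain ⟨hd0, hdn⟩ := hd
      have hBeq : shape_aligned_otherdim_alt a b d =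
          decide (a.take d.toNat = b.take d.toNat ∧
            a.drop (d + 1).toNat = b.drop (d + 1).toNat ∧
            a.getD d.toNat 0 ≠ b.getD d.toNat 0) := by
        unfold shape_aligned_otherdim_alt
        rw [if_neg (not_not_intro hlen), if_neg (not_not_intro ⟨hd0, hdn⟩),
          PySem.List.slice_to a hd0, PySem.List.slice_to b hd0,
          PySem.List.slice_from a (show (0:Int) ≤ d + 1 by omega),
          PySem.List.slice_from b (show (0:Int) ≤ d + 1 by omega)]
      rw [hBeq]
      rcases Bool.eq_false_or_eq_true (shape_aligned_otherdim a b d) with hAt | hAf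
      · rw [hAt]
        rw [pv_A_true_iff] at hAt
        obtain ⟨-, k, hkd, hk, hne, huniq⟩ := hAt
        have hkt : k = d.toNat := by omega
        subst hkt
        symm
        rw [decide_eq_true_iff]
        refine ⟨?_, ?_, hne⟩
        · rw [pv_take_eq_iff]
          intro i hi
          rw [← pv_getD_eq_iff a b i (by omega) (by omega)]
          exact huniq i (by omega) (by omega)
        · rw [pv_drop_eq_iff]
          intro i hi
          by_cases hin : i < a.length
          · rw [← pv_getD_eq_iff a b i hin (hlen ▸ hin)]
            exact huniq i hin (by omega)
          · rw [List.getElem?_eq_none (by omega), List.getElem?_eq_none (by omega)]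
      · rw [hAf]
        symm
        rw [decide_eq_false_iff_not]
        rintro ⟨htake, hdrop, hne⟩
        have hAt : shape_aligned_otherdim a b d = true := by
          rw [pv_A_true_iff]
          refine ⟨hlen, d.toNat, by omega, by omega, hne, ?_⟩
          intro i hi hik
          rw [pv_getD_eq_iff a b i hi (hlen ▸ hi)]
          by_cases hlt : i < d.toNat
          · exact (pv_take_eq_iff a b d.toNat).mp htake i hlt
          · exact (pv_drop_eq_iff a b (d + 1).toNat).mp hdrop i (by omega)
        rw [hAt] at hAf; exact absurd hAf (by simp)
    · -- out-of-range dim_idx: A can never produce diff_dim = [dim_idx], B's guard fires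
      have hBf : shape_aligned_otherdim_alt a b d = false := by
        unfold shape_aligned_otherdim_alt
        rw [if_neg (not_not_intro hlen), if_pos hd]
      rw [hBf]
      rcases Bool.eq_false_or_eq_true (shape_aligned_otherdim a b d) with hAt | hAf
      · exfalso
        rw [pv_A_true_iff] at hAt
        obtain ⟨-, k, hkd, hk, -, -⟩ := hAt
        exact hd ⟨by omega, by omega⟩
      · exact hAf
  · -- length mismatch: both return false
    unfold shape_aligned_otherdim shape_aligned_otherdim_alt
    rw [if_pos hlen, if_pos hlen]
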